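-- pv_equiv track=rewrite | github.com/RacoonX65/Tempmail | ui/layout.py | extract_subject
-- ===== SOURCE A (Python) =====
-- def extract_subject(message):
--     lines = message.splitlines()
--     for line in lines:
--         if "subject:" in line.lower():
--             parts = line.split(":", 1)
--             return parts[1].strip() if len(parts) > 1 else "No Subject"
--     # If nothing matched, fallback to first line with text
--     for line in lines:
--         if line.strip():
--             return line.strip()[:80]
--     return "No Subject"
-- ===== SOURCE B (Python) =====
-- def extract_subject(message):
--     fallback = None
--     for line in message.splitlines():
--         if "subject:" in line.lower():
--             parts = line.split(":", 1)
--             return parts[1].strip() if len(parts) > 1 else "No Subject"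
--         if fallback is None:
--             stripped = line.strip()
--             if stripped:
--                 fallback = stripped[:80]
--     return fallback if fallback is not None else "No Subject"
-- ===== Notes on version B (the rewrite author's own statement) =====
-- stated objective: alternative
-- what changed: Replaces A's two sequential scans of the line list (one for a subject line, one for the first non-blank fallback) by a single scan that maintains the fallback candidate while looking for the subject line.
import Mathlib
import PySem

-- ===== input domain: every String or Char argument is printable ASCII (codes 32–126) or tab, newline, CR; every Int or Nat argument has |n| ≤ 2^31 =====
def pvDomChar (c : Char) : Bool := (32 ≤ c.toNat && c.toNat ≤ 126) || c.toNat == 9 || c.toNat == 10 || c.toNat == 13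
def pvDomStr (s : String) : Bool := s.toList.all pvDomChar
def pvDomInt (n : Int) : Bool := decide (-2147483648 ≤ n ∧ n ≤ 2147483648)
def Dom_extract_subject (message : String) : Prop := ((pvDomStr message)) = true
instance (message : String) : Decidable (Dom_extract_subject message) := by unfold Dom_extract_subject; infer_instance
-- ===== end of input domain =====

-- B merges A's two sequential scans into one pass that carries the fallback candidate; objective: alternative.

-- ===== PORT A =====
-- the value returned when a subject line is found (shared shape of the Python return expression)
def pvSubjVal (line : String) : String :=
  match (PySem.Str.splitMax? line ":" 1).getD [] with
  | _ :: p1 :: _ => PySem.Str.strip p1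
  | _ => "No Subject"

-- first loop of A: return on the first line containing "subject:" (case-insensitive)
def pvSubjLoopA : List String → Option String
  | [] => none
  | line :: rest =>
    if PySem.Str.isIn "subject:" (PySem.Str.lower line) then some (pvSubjVal line)
    else pvSubjLoopA rest

-- second loop of A: first line with text, stripped and truncated to 80
def pvFallbackA : List String → Option String
  | [] => none
  | line :: rest =>
    if PySem.Str.len (PySem.Str.strip line) ≠ 0 then
      some (PySem.Str.slice (PySem.Str.strip line) none (some 80))
    else pvFallbackA rest

def extract_subject (message : String) : String :=
  let lines := PySem.Str.splitlines message
  match pvSubjLoopA lines with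
  | some r => r
  | none =>
    match pvFallbackA lines with
    | some r => r
    | none => "No Subject"

-- ===== PORT B =====
-- single pass: return at a subject line, else record the first non-blank line as fallback
def pvLoopB : List String → Option String → String
  | [], fallback => fallback.getD "No Subject"
  | line :: rest, fallback =>
    if PySem.Str.isIn "subject:" (PySem.Str.lower line) then
      match (PySem.Str.splitMax? line ":" 1).getD [] with
      | _ :: p1 :: _ => PySem.Str.strip p1
      | _ => "No Subject"
    else
      pvLoopB rest
        (match fallback with
         | some f => some f
         | none =>
           let stripped := PySem.Str.strip line
           if PySem.Str.len stripped ≠ 0 then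
             some (PySem.Str.slice stripped none (some 80))
           else none)

def extract_subject_alt (message : String) : String :=
  pvLoopB (PySem.Str.splitlines message) none

-- ===== PRECONDITION & SPEC =====
def Spec_extract_subject (message : String) (out : String) : Prop := out = extract_subject_alt message
instance (message : String) (out : String) : Decidable (Spec_extract_subject message out) := by unfold Spec_extract_subject; infer_instance

-- ===== CLAIM (what is proved, stated in full; the proofs are below) =====
def Claim_equal_extract_subject : Prop := ∀ (message : String), Dom_extract_subject message → Spec_extract_subject message (extract_subject message)

-- ===== LEMMAS AND PROOFS =====

lemma pvLoopB_eq (lines : List String) (fb : Option String) :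
    pvLoopB lines fb =
      match pvSubjLoopA lines with
      | some r => r
      | none => ((match fb with | some f => some f | none => pvFallbackA lines).getD "No Subject") := by
  induction lines generalizing fb with
  | nil => cases fb <;> simp [pvLoopB, pvSubjLoopA, pvFallbackA, Option.getD]
  | cons line rest ih =>
    by_cases h : PySem.Str.isIn "subject:" (PySem.Str.lower line) = true
    · simp only [pvLoopB, pvSubjLoopA, pvSubjVal, h]
      simp
    · simp only [pvLoopB, pvSubjLoopA, h, if_false, Bool.false_eq_true]
      rw [ih]
      cases fb with
      | some f => simp
      | none =>
        by_cases hs : PySem.Chars.strip line.toList = []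
        · simp [pvFallbackA, hs]
        · simp [pvFallbackA, hs]

-- ===== VERDICT (by name: the statement is the Claim_ definition above) =====
theorem extract_subject_spec : Claim_equal_extract_subject := by
  intro message _
  unfold Spec_extract_subject extract_subject extract_subject_alt
  rw [pvLoopB_eq]
  cases h : pvSubjLoopA (PySem.Str.splitlines message) with
  | some r => simp [h]
  | none => cases h2 : pvFallbackA (PySem.Str.splitlines message) <;> simp [h, h2]
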